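-- pv_equiv track=rewrite | github.com/maxhirsch/Exam-Conflicts | reduce_conflicts.py | count_threes
-- ===== SOURCE A (Python) =====
-- def count_threes(array):
--     i, j, k = 0, 1, 2
--
--     count = 0
--     while k < len(array):
--         if array[i] > 0 and array[j] > 0 and array[k] > 0:
--             count += 1
--         i += 1
--         j += 1
--         k += 1
--
--     return count
-- ===== SOURCE B (Python) =====
-- def count_threes(array):
--     run = 0
--     total = 0
--     for x in array:
--         if x > 0:
--             run += 1
--             if run >= 3:
--                 total += 1
--         else:
--             run = 0
--     return total
-- ===== Notes on version B (the rewrite author's own statement) =====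
-- stated objective: simpler
-- what changed: Replaces the three explicit sliding indices with a single run-length counter of consecutive positives (a run of length L contributes L-2 triples), adding 1 whenever the run reaches 3.
import Mathlib
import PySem

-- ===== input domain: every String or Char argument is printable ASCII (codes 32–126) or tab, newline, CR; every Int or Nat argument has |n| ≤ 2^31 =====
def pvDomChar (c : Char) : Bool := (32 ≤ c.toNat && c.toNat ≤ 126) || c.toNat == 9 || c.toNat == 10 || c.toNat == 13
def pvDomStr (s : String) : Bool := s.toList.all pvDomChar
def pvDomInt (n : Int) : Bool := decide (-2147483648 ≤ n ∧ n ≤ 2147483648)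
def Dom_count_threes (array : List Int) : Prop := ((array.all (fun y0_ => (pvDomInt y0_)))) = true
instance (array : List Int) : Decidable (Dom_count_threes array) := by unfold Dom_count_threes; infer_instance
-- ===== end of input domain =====

-- B replaces A's three sliding window indices by a single run-length counter of
-- consecutive positives (simpler decomposition, same O(n) cost).

-- ===== PORT A =====
-- while-loop of A: counters i, j, k and count; the indexing array[i] is always
-- in range when read (0 ≤ i < j < k < len), so the .getD 0 default never fires.
def pvLoopA (array : List Int) (i j k count : Int) : Int :=
  if k < (array.length : Int) then
    pvLoopA array (i+1) (j+1) (k+1)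
      (if (PySem.List.pyGet? array i).getD 0 > 0 ∧ (PySem.List.pyGet? array j).getD 0 > 0 ∧
          (PySem.List.pyGet? array k).getD 0 > 0 then count + 1 else count)
  else count
termination_by ((array.length : Int) - k).toNat
decreasing_by omega

def count_threes (array : List Int) : Int := pvLoopA array 0 1 2 0

-- ===== PORT B =====
def count_threes_alt (array : List Int) : Int :=
  (array.foldl
    (fun (s : Int × Int) x =>
      if x > 0 then (s.1 + 1, if s.1 + 1 ≥ 3 then s.2 + 1 else s.2) else (0, s.2))
    ((0 : Int), (0 : Int))).2

-- ===== PRECONDITION & SPEC =====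
def Spec_count_threes (array : List Int) (out : Int) : Prop := out = count_threes_alt array
instance (array : List Int) (out : Int) : Decidable (Spec_count_threes array out) := by unfold Spec_count_threes; infer_instance

-- ===== CLAIM (what is proved, stated in full; the proofs are below) =====
def Claim_equal_count_threes : Prop := ∀ (array : List Int), Dom_count_threes array → Spec_count_threes array (count_threes array)

-- ===== LEMMAS AND PROOFS =====

-- reference: number of all-positive consecutive windows of length 3
def pvF : List Int → Int
  | a :: b :: c :: rest => (if a > 0 ∧ b > 0 ∧ c > 0 then 1 else 0) + pvF (b :: c :: rest)
  | _ => 0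
termination_by l => l.length
decreasing_by simp

-- run-state view: r is the (capped at 2) length of the current positive run
def pvG : List Int → Nat → Int
  | [], _ => 0
  | x :: rest, r => if x > 0 then (if 2 ≤ r then 1 else 0) + pvG rest (min (r+1) 2) else pvG rest 0

lemma pvLoopA_eq (l : List Int) : ∀ (array : List Int) (i c : Int), 0 ≤ i →
    List.drop i.toNat array = l → pvLoopA array i (i+1) (i+2) c = c + pvF l := by
  induction l with
  | nil =>
    intro array i c hi hdrop
    have hlen : array.length ≤ i.toNat := by
      have := congrArg List.length hdrop
      simp [List.length_drop] at this
      omega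
    rw [pvLoopA, if_neg (by omega)]
    simp [pvF]
  | cons x xs ih =>
    intro array i c hi hdrop
    have hlen : array.length = i.toNat + xs.length + 1 := by
      have hle : i.toNat ≤ array.length := by
        by_contra h
        rw [List.drop_eq_nil_of_le (by omega)] at hdrop
        simp at hdrop
      have := congrArg List.length hdrop
      simp [List.length_drop] at this
      omega
    match xs, ih with
    | [], _ =>
      rw [pvLoopA, if_neg (by simp at hlen; omega)]
      simp [pvF]
    | [y], _ =>
      rw [pvLoopA, if_neg (by simp at hlen; omega)]
      simp [pvF]
    | b :: c' :: rest, ih =>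
      have hcond : i + 2 < (array.length : Int) := by simp at hlen; omega
      have hg : ∀ m : Nat, PySem.List.pyGet? array (i + (m : Int)) = (x :: b :: c' :: rest)[m]? := by
        intro m
        rw [PySem.List.pyGet?_of_nonneg array (by omega : (0:Int) ≤ i + (m:Int))]
        have : (i + (m : Int)).toNat = i.toNat + m := by omega
        rw [this, ← List.getElem?_drop, hdrop]
      have h0 := hg 0; have h1 := hg 1; have h2 := hg 2
      norm_num at h0 h1 h2
      rw [pvLoopA, if_pos hcond, h0, h1, h2]
      have hdrop' : List.drop (i+1).toNat array = b :: c' :: rest := by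
        have : (i+1).toNat = i.toNat + 1 := by omega
        rw [this, ← List.tail_drop, hdrop]
        rfl
      have e : i + 2 + 1 = i + 1 + 2 := by ring
      rw [e, ih array (i+1) _ (by omega) hdrop', pvF]
      simp only [Option.getD_some]
      split_ifs <;> ring

lemma foldB_eq (l : List Int) : ∀ (run total : Int), 0 ≤ run →
    (l.foldl
      (fun (s : Int × Int) x =>
        if x > 0 then (s.1 + 1, if s.1 + 1 ≥ 3 then s.2 + 1 else s.2) else (0, s.2))
      (run, total)).2 = total + pvG l (min run.toNat 2) := by
  induction l with
  | nil => intro run total _; simp [pvG]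
  | cons x xs ih =>
    intro run total hrun
    simp only [List.foldl_cons]
    by_cases hx : x > 0
    · simp only [hx, if_pos]
      rw [ih (run + 1) _ (by omega)]
      have h1 : min (run + 1).toNat 2 = min (min run.toNat 2 + 1) 2 := by omega
      have h2 : (if run + 1 ≥ 3 then total + 1 else total)
          = total + (if 2 ≤ min run.toNat 2 then (1:Int) else 0) := by
        split_ifs with a b <;> omega
      rw [pvG, if_pos hx, h1, h2]
      ring
    · simp only [hx, if_false]
      rw [ih 0 total (le_refl 0)]
      rw [pvG, if_neg hx]
      norm_num

lemma pvF_bridge (l : List Int) : ∀ a b : Int,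
    pvF (a :: b :: l) = pvG l (if 0 < b then (if 0 < a then 2 else 1) else 0) := by
  induction l with
  | nil => intro a b; simp [pvF, pvG]
  | cons x rest ih =>
    intro a b
    rw [pvF, ih b x, pvG]
    by_cases hx : 0 < x
    · simp only [hx, if_pos]
      by_cases ha : 0 < a <;> by_cases hb : 0 < b <;>
        simp [ha, hb]
    · simp only [hx, if_false]
      simp

lemma pvF_eq_pvG (l : List Int) : pvF l = pvG l 0 := by
  match l with
  | [] => simp [pvF, pvG]
  | [x] => by_cases hx : 0 < x <;> simp [pvF, pvG, hx]
  | x :: y :: tl =>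
    rw [pvF_bridge tl x y, pvG]
    by_cases hx : 0 < x <;> by_cases hy : 0 < y <;>
      simp [pvG, hx, hy]

-- ===== VERDICT (by name: the statement is the Claim_ definition above) =====
theorem count_threes_spec : Claim_equal_count_threes := by
  intro array _
  unfold Spec_count_threes count_threes count_threes_alt
  have hA := pvLoopA_eq array array 0 0 (by norm_num) (by simp)
  norm_num at hA
  have hB := foldB_eq array 0 0 (by norm_num)
  norm_num at hB
  rw [hA, hB, pvF_eq_pvG]
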